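-- pv_equiv track=rewrite | github.com/gcmillora/Custom-Programming-Lang | utils/Utils.py | is_iol_valid
-- ===== SOURCE A (Python) =====
-- def is_iol_valid(lines: list[str]) -> bool:
--     iol_found = False
--     content_found = False
--     loi_found = False
--     for line in lines:
--         # Remove the whitespaces before and after the line
--         line = line.strip()
--         # The valid sequence of content is 'IOL', content, then 'LOI'
--         if line == "IOL":
--             # If another 'IOL' is found it is invalid
--             if iol_found:
--                 return False
--             iol_found = True
--         elif line == "LOI":
--             # If the line is 'LOI' and the 'IOL' has not been found it is invalid
--             # or if another 'LOI' is found it is invalid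
--             if not iol_found or loi_found:
--                 return False
--             loi_found = True
--         elif line == "":
--             # If the line is an empty space then skip
--             continue
--         else:
--             # If the 'IOL' has not been found before the content is it invalid
--             # or if the content has been found and the 'LOI' has been found, it is also invalid
--             if not iol_found or loi_found:
--                 return False
--             elif content_found:
--                 continue
--             content_found = True
--
--     return iol_found and loi_found
-- ===== SOURCE B (Python) =====
-- def is_iol_valid(lines: list[str]) -> bool:
--     tokens = [s for s in (l.strip() for l in lines) if s]
--     return (len(tokens) >= 2
--             and tokens[0] == "IOL"
--             and tokens[-1] == "LOI"
--             and all(t not in ("IOL", "LOI") for t in tokens[1:-1]))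
-- ===== Notes on version B (the rewrite author's own statement) =====
-- stated objective: simpler
-- what changed: Replaces the three-flag streaming state machine with a materialized list of stripped nonempty tokens checked by endpoints (first=IOL, last=LOI) and interior membership.
import Mathlib
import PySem

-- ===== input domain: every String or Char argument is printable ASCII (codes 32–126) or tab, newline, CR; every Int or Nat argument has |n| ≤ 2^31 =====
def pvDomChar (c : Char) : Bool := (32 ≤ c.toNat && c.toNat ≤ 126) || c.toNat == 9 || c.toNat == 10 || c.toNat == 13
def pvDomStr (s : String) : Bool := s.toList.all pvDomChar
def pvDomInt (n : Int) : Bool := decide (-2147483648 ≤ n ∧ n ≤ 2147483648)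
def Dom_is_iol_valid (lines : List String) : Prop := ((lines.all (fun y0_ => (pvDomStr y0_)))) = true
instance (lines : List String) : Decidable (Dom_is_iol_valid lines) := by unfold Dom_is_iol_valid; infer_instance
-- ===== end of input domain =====

-- B replaces A's three-flag streaming state machine with a materialized token list
-- checked by its endpoints and interior membership (objective: simpler).

-- ===== PORT A =====
-- A's for-loop with early returns, as structural recursion over the lines
-- carrying the three flags (iol_found, content_found, loi_found) as state
def is_iol_valid_loop : List String → Bool → Bool → Bool → Bool
  | [], iol_found, _content_found, loi_found => iol_found && loi_found
  | line :: rest, iol_found, content_found, loi_found =>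
      let s := PySem.Str.strip line
      if s == "IOL" then
        if iol_found then false
        else is_iol_valid_loop rest true content_found loi_found
      else if s == "LOI" then
        if !iol_found || loi_found then false
        else is_iol_valid_loop rest iol_found content_found true
      else if s == "" then
        is_iol_valid_loop rest iol_found content_found loi_found
      else
        if !iol_found || loi_found then false
        else if content_found then is_iol_valid_loop rest iol_found content_found loi_found
        else is_iol_valid_loop rest iol_found true loi_found

def is_iol_valid (lines : List String) : Bool :=
  is_iol_valid_loop lines false false false

-- ===== PORT B =====
def is_iol_valid_alt (lines : List String) : Bool :=
  let tokens := (lines.map PySem.Str.strip).filter (fun s => s ≠ "")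
  decide (2 ≤ tokens.length) && (tokens.head? == some "IOL") && (tokens.getLast? == some "LOI")
    && (tokens.drop 1).dropLast.all (fun t => t ≠ "IOL" && t ≠ "LOI")

-- ===== PRECONDITION & SPEC =====
def Spec_is_iol_valid (lines : List String) (out : Bool) : Prop := out = is_iol_valid_alt lines
instance (lines : List String) (out : Bool) : Decidable (Spec_is_iol_valid lines out) := by unfold Spec_is_iol_valid; infer_instance

-- ===== CLAIM (what is proved, stated in full; the proofs are below) =====
def Claim_equal_is_iol_valid : Prop := ∀ (lines : List String), Dom_is_iol_valid lines → Spec_is_iol_valid lines (is_iol_valid lines)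

-- ===== LEMMAS AND PROOFS =====

-- A's loop restricted to the already-stripped, nonempty tokens
def tokLoop : List String → Bool → Bool → Bool → Bool
  | [], i, _c, l => i && l
  | t :: rest, i, c, l =>
      if t == "IOL" then (if i then false else tokLoop rest true c l)
      else if t == "LOI" then (if !i || l then false else tokLoop rest i c true)
      else if !i || l then false
      else if c then tokLoop rest i c l
      else tokLoop rest i true l

-- processing a line is processing its stripped token (or nothing, if it strips empty)
lemma loop_eq_tokLoop (lines : List String) (i c l : Bool) :
    is_iol_valid_loop lines i c l =
      tokLoop ((lines.map PySem.Str.strip).filter (fun s => s ≠ "")) i c l := by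
  induction lines generalizing i c l with
  | nil => rfl
  | cons x rest ih =>
      simp only [is_iol_valid_loop, List.map_cons, List.filter_cons]
      by_cases hs : PySem.Str.strip x = ""
      · simp [hs, ih]
      · have hne : (PySem.Str.strip x == "") = false := by simp [hs]
        simp only [hs, decide_not, ne_eq, decide_true, not_false_eq_true, if_pos, tokLoop, hne,
          Bool.false_eq_true, if_false]
        split_ifs <;> simp [ih]

-- once LOI has been seen (IOL found), any further token fails
lemma tokLoop_after_loi (toks : List String) (c : Bool) :
    tokLoop toks true c true = toks.isEmpty := by
  cases toks with
  | nil => simp [tokLoop]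
  | cons t rest => simp [tokLoop]

-- after IOL was found (LOI not yet), the loop accepts iff the last token is LOI
-- and no earlier token is IOL/LOI
lemma tokLoop_after_iol (toks : List String) (c : Bool) :
    tokLoop toks true c false =
      ((toks.getLast? == some "LOI") &&
        toks.dropLast.all (fun t => t ≠ "IOL" && t ≠ "LOI")) := by
  induction toks generalizing c with
  | nil => simp [tokLoop]
  | cons t rest ih =>
      simp only [tokLoop]
      by_cases h1 : t = "IOL"
      · subst h1
        cases rest with
        | nil => simp
        | cons u rs => simp [List.getLast?_cons_cons, List.dropLast_cons_of_ne_nil]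
      · by_cases h2 : t = "LOI"
        · subst h2
          simp only [h1, beq_iff_eq, if_false, beq_self_eq_true, if_true, Bool.not_true,
            Bool.false_or, Bool.false_eq_true, ite_false]
          rw [tokLoop_after_loi]
          cases rest with
          | nil => simp
          | cons u rs => simp [List.getLast?_cons_cons, List.dropLast_cons_of_ne_nil]
        · simp only [beq_iff_eq, h1, h2, if_false, Bool.not_true, Bool.false_or,
            Bool.false_eq_true, ite_false]
          have key : tokLoop rest true true false =
              ((rest.getLast? == some "LOI") &&
                rest.dropLast.all (fun t => t ≠ "IOL" && t ≠ "LOI")) := ih true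
          have hc : (if c then tokLoop rest true c false else tokLoop rest true true false)
              = tokLoop rest true true false := by
            cases c
            · simp
            · simp
          rw [hc, key]
          cases rest with
          | nil => simp [h1, h2]
          | cons u rs => simp [List.getLast?_cons_cons, List.dropLast_cons_of_ne_nil, h1, h2]

-- the loop from the start state, characterised on any token list
lemma tokLoop_start (toks : List String) :
    tokLoop toks false false false =
      (decide (2 ≤ toks.length) && (toks.head? == some "IOL") && (toks.getLast? == some "LOI")
        && (toks.drop 1).dropLast.all (fun t => t ≠ "IOL" && t ≠ "LOI")) := by
  cases toks with
  | nil => simp [tokLoop]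
  | cons t rest =>
      simp only [tokLoop]
      by_cases h1 : t = "IOL"
      · subst h1
        simp only [beq_self_eq_true, if_true, Bool.false_eq_true, ite_false]
        rw [tokLoop_after_iol]
        cases rest with
        | nil => simp
        | cons u rs =>
            simp [List.getLast?_cons_cons, List.length_cons]
      · by_cases h2 : t = "LOI" <;> simp [h1, h2, tokLoop]

-- ===== VERDICT (by name: the statement is the Claim_ definition above) =====
theorem is_iol_valid_spec : Claim_equal_is_iol_valid := by
  intro lines _
  unfold Spec_is_iol_valid is_iol_valid is_iol_valid_alt
  rw [loop_eq_tokLoop, tokLoop_start]
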